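-- pv_equiv track=rewrite | github.com/emirocampo/bot | bot-trader/app.py | findSwingLow
-- ===== SOURCE A (Python) =====
-- def findSwingLow(array):
--     flag_r = False
--     for e in reversed(array):
--         if(e[0]=="sl"):
--             flag_r = True
--             return e
--         if(flag_r):
--             break
--         pass
--     pass
-- ===== SOURCE B (Python) =====
-- def findSwingLow(array):
--     result = None
--     for e in array:
--         if e and e[0] == "sl":
--             result = e
--     return result
-- ===== Notes on version B (the rewrite author's own statement) =====
-- stated objective: alternative
-- what changed: Replaces the backward early-exit scan with a single forward pass that maintains a last-seen-match accumulator (and no flag/break machinery), returning the accumulator at the end.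
import Mathlib
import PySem

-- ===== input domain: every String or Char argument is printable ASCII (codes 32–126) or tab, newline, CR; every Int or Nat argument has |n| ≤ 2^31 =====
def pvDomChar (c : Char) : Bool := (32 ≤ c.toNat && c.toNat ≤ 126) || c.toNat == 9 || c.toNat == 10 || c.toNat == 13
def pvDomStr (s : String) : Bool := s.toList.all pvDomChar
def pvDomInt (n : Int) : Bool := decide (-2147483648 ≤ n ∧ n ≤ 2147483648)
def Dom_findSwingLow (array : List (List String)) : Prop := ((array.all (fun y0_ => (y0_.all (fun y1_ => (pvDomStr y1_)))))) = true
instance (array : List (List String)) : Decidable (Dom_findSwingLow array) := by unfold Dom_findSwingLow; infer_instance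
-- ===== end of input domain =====

-- B replaces A's backward early-exit scan by one forward pass with a last-seen-match accumulator.


-- ===== PORT A =====
-- loop over reversed(array); flag_r is carried exactly as in A (it is set only right before a return)
def findSwingLowGo (flag : Bool) : List (List String) → Option (List String)
  | [] => none                                  -- loop ends: Python falls off and returns None
  | e :: rest =>
    match PySem.List.pyGet? e 0 with            -- e[0]
    | none => none                              -- IndexError; excluded by Pre_findSwingLow
    | some s =>
      if s == "sl" then some e
      else if flag then none                    -- 'if flag_r: break' then implicit return None
      else findSwingLowGo flag rest

def findSwingLow (array : List (List String)) : Option (List String) :=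
  findSwingLowGo false array.reverse

-- ===== PORT B =====
-- result = None; for e in array: if e and e[0] == "sl": result = e; return result
def findSwingLow_alt (array : List (List String)) : Option (List String) :=
  array.foldl (fun result e => if e.head? == some "sl" then some e else result) none

-- ===== PRECONDITION & SPEC =====
-- Pre_ excludes exactly the inputs on which A raises IndexError: an empty row with no
-- "sl"-headed row at or after it makes A index e[0] on an empty list.
def Pre_findSwingLow (array : List (List String)) : Prop :=
  ∀ i < array.length, array.getD i [] = [] →
    ∃ j < array.length, i ≤ j ∧ (array.getD j []).head? = some "sl"
instance (array : List (List String)) : Decidable (Pre_findSwingLow array) := by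
  unfold Pre_findSwingLow; infer_instance

def pvWitness_findSwingLow : List (List String) := [["a"], ["sl", "1"], ["b"]]

def Spec_findSwingLow (array : List (List String)) (out : Option (List String)) : Prop := out = findSwingLow_alt array
instance (array : List (List String)) (out : Option (List String)) : Decidable (Spec_findSwingLow array out) := by unfold Spec_findSwingLow; infer_instance

-- ===== CLAIM (what is proved, stated in full; the proofs are below) =====
def Claim_equal_findSwingLow : Prop := ∀ (array : List (List String)), Dom_findSwingLow array → Pre_findSwingLow array → Spec_findSwingLow array (findSwingLow array)

-- ===== LEMMAS AND PROOFS =====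

-- the match predicate both programs test
def pSL (e : List String) : Bool := e.head? == some "sl"

-- B: the foldl accumulator is the last match, i.e. the first match of the reverse
theorem foldl_eq_find?_reverse (l : List (List String)) (acc : Option (List String)) :
    l.foldl (fun result e => if e.head? == some "sl" then some e else result) acc
      = (l.reverse.find? pSL).or acc := by
  induction l generalizing acc with
  | nil => simp
  | cons e rest ih =>
    simp only [List.foldl_cons, List.reverse_cons, List.find?_append]
    rw [ih]
    cases hf : List.find? pSL rest.reverse <;> cases h : (e.head? == some "sl") <;>
      simp [List.find?, pSL, h, Option.or]

-- A: under the no-IndexError invariant, the backward scan is find? on the reversed list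
theorem goA_eq_find? (l : List (List String))
    (H : ∀ i < l.length, l.getD i [] = [] →
          ∃ j < l.length, j ≤ i ∧ pSL (l.getD j []) = true) :
    findSwingLowGo false l = l.find? pSL := by
  induction l with
  | nil => simp [findSwingLowGo]
  | cons e rest ih =>
    cases e with
    | nil =>
      exfalso
      obtain ⟨j, _, hj0, hp⟩ := H 0 (by simp) (by simp)
      interval_cases j
      simp [pSL] at hp
    | cons s t =>
      have hget : PySem.List.pyGet? (s :: t) (0 : Int) = some s := by
        simp [PySem.List.pyGet?, PySem.List.pyIdx?]
      by_cases hs : s = "sl"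
      · subst hs
        simp [findSwingLowGo, List.find?, pSL]
      · have hps : pSL (s :: t) = false := by simp [pSL, hs]
        have hrest : ∀ i < rest.length, rest.getD i [] = [] →
            ∃ j < rest.length, j ≤ i ∧ pSL (rest.getD j []) = true := by
          intro i hi he
          obtain ⟨j, hjl, hji, hp⟩ := H (i + 1) (by simp; omega)
            (by simpa [List.getD_cons_succ] using he)
          match j with
          | 0 => simp [hps] at hp
          | j + 1 =>
            exact ⟨j, by simp at hjl; omega, by omega,
              by simpa [List.getD_cons_succ] using hp⟩
        simp only [findSwingLowGo, hget]
        rw [if_neg (by simpa using hs), if_neg (by simp)]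
        rw [ih hrest]
        simp [List.find?, hps]

-- transport Pre_ (an "sl" at-or-after every empty row) to the reversed list (at-or-before)
theorem pre_reverse (array : List (List String)) (hpre : Pre_findSwingLow array) :
    ∀ i < array.reverse.length, array.reverse.getD i [] = [] →
      ∃ j < array.reverse.length, j ≤ i ∧ pSL (array.reverse.getD j []) = true := by
  intro i hi he
  simp only [List.length_reverse] at hi
  have hrev : ∀ k, k < array.length →
      array.reverse.getD k [] = array.getD (array.length - 1 - k) [] := by
    intro k hk
    simp [List.getD_eq_getElem?_getD, List.getElem?_reverse hk]
  rw [hrev i hi] at he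
  obtain ⟨j, hjl, hij, hp⟩ := hpre (array.length - 1 - i) (by omega) he
  refine ⟨array.length - 1 - j, by simp; omega, by omega, ?_⟩
  rw [hrev _ (by omega)]
  have : array.length - 1 - (array.length - 1 - j) = j := by omega
  rw [this]
  simp only [pSL]
  rw [hp]
  rfl

-- ===== VERDICT (by name: the statement is the Claim_ definition above) =====
theorem findSwingLow_spec : Claim_equal_findSwingLow := by
  intro array _ hpre
  unfold Spec_findSwingLow findSwingLow findSwingLow_alt
  rw [goA_eq_find? _ (pre_reverse array hpre),
    foldl_eq_find?_reverse array none, Option.or_none]
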